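-- pv_equiv track=rewrite | github.com/kb13000231/python | decodealgo1.py | alpha_check
-- ===== SOURCE A (Python) =====
-- def alpha_check(inp_alp):
--     dd = dict()
--     for i in range(len(inp_alp)):
--         if inp_alp[i] not in dd.keys():
--             dd[inp_alp[i]] = dd.get(inp_alp[i],0) + 1
--         else:
--             dd[inp_alp[i]] += 1
--
--     for k,v in dd.items():
--         if v >1:
--             return 0
--     return 1
-- ===== SOURCE B (Python) =====
-- def alpha_check(inp_alp):
--     return 1 if len(set(inp_alp)) == len(inp_alp) else 0
-- ===== Notes on version B (the rewrite author's own statement) =====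
-- stated objective: simpler
-- what changed: Replaces the count-dict building loop plus the scan-for-a-count>1 loop with a single distinct-count vs total-count comparison (len(set(s)) == len(s)), no explicit loops.
import Mathlib
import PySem

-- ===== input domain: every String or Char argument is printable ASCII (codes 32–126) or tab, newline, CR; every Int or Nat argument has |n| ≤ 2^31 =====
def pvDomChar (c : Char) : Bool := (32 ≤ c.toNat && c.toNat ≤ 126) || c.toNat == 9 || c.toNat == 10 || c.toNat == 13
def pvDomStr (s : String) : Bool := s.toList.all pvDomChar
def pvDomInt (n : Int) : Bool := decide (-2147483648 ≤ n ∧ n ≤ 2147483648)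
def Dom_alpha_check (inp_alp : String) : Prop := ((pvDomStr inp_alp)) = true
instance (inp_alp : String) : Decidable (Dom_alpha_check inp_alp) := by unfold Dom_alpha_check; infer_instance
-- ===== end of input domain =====

-- B replaces A's count-dict loop plus scan-for-a-count>1 loop by comparing the
-- distinct-element count len(set(s)) with len(s); same value everywhere (timing run measured B faster by a constant factor).

-- ===== PORT A =====
-- second loop of A: first item with value > 1 returns 0, else 1
def alphaCheckScan : List (Char × Int) → Int
  | [] => 1
  | (_, v) :: rest => if v > 1 then 0 else alphaCheckScan rest

def alpha_check (inp_alp : String) : Int :=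
  let xs := inp_alp.toList
  let dd : PySem.Dict Char Int :=
    (PySem.List.pyRange 0 (PySem.List.len xs) 1).foldl
      (fun d i =>
        -- inp_alp[i]: i ∈ range(len) is always in range, so the default is never used
        let c := PySem.List.pyGetD xs i ' '
        if ¬ d.contains c then
          d.insert c (d.getD c 0 + 1)        -- dd[c] = dd.get(c, 0) + 1
        else
          d.insert c (d.getD c 0 + 1))       -- dd[c] += 1 (key present)
      PySem.Dict.empty
  alphaCheckScan dd.items

-- ===== PORT B =====
def alpha_check_alt (inp_alp : String) : Int :=
  if PySem.Set.len (PySem.Set.ofList inp_alp.toList) = PySem.Str.len inp_alp then 1 else 0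

-- ===== PRECONDITION & SPEC =====
def Spec_alpha_check (inp_alp : String) (out : Int) : Prop := out = alpha_check_alt inp_alp
instance (inp_alp : String) (out : Int) : Decidable (Spec_alpha_check inp_alp out) := by unfold Spec_alpha_check; infer_instance

-- ===== CLAIM (what is proved, stated in full; the proofs are below) =====
def Claim_equal_alpha_check : Prop := ∀ (inp_alp : String), Dom_alpha_check inp_alp → Spec_alpha_check inp_alp (alpha_check inp_alp)

-- ===== LEMMAS AND PROOFS =====

-- the scan over Counter items returns 1 iff every listed key has count ≤ 1
lemma alphaCheckScan_map (xs : List Char) (l : List Char) :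
    alphaCheckScan (l.map (fun k => (k, (xs.count k : Int)))) =
      if ∀ k ∈ l, xs.count k ≤ 1 then 1 else 0 := by
  induction l with
  | nil => simp [alphaCheckScan]
  | cons a l ih =>
    simp only [List.map_cons, alphaCheckScan, ih]
    by_cases ha : xs.count a ≤ 1
    · have : ¬ ((xs.count a : Int) > 1) := by exact_mod_cast not_lt.mpr (by exact_mod_cast ha)
      simp [this, ha]
    · have : (xs.count a : Int) > 1 := by exact_mod_cast lt_of_not_ge ha
      simp [this, ha]

-- number of distinct elements equals the length iff the list has no duplicates
lemma ofList_length_eq_iff (xs : List Char) :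
    (PySem.Set.ofList xs).length = xs.length ↔ xs.Nodup := by
  constructor
  · intro h
    have hcard : (PySem.Set.ofList xs).length = xs.toFinset.card := by
      rw [← List.toFinset_card_of_nodup (PySem.Set.nodup_ofList xs)]
      congr 1
      ext a
      simp [PySem.Set.mem_ofList]
    rw [hcard, List.card_toFinset] at h
    have := List.Sublist.eq_of_length (List.dedup_sublist xs) h
    exact List.dedup_eq_self.mp this
  · intro h
    rw [PySem.Set.ofList_eq_self_of_nodup xs h]

theorem alpha_check_eq (inp_alp : String) :
    alpha_check inp_alp = alpha_check_alt inp_alp := by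
  unfold alpha_check alpha_check_alt
  have hfold :
      (PySem.List.pyRange 0 (PySem.List.len inp_alp.toList) 1).foldl
        (fun (d : PySem.Dict Char Int) i =>
          let c := PySem.List.pyGetD inp_alp.toList i ' '
          if ¬ d.contains c then d.insert c (d.getD c 0 + 1)
          else d.insert c (d.getD c 0 + 1))
        PySem.Dict.empty = PySem.Dict.counter inp_alp.toList := by
    have hcollapse :
        (fun (d : PySem.Dict Char Int) i =>
          let c := PySem.List.pyGetD inp_alp.toList i ' '
          if ¬ d.contains c then d.insert c (d.getD c 0 + 1)
          else d.insert c (d.getD c 0 + 1)) =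
        (fun (d : PySem.Dict Char Int) i =>
          (fun d' c => d'.insert c (d'.getD c 0 + 1)) d
            (PySem.List.pyGetD inp_alp.toList i ' ')) := by
      funext d i; simp
    rw [hcollapse,
        PySem.List.foldl_pyRange_zero_pyGetD inp_alp.toList ' '
          (fun (d : PySem.Dict Char Int) c => d.insert c (d.getD c 0 + 1)) PySem.Dict.empty,
        PySem.Dict.foldl_insert_getD_add_one_eq_counter]
  simp only [hfold, PySem.Dict.items_counter, alphaCheckScan_map]
  by_cases hn : inp_alp.toList.Nodup
  · have hlen : (PySem.Set.ofList inp_alp.toList).length = inp_alp.toList.length :=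
      (ofList_length_eq_iff _).mpr hn
    have hall : ∀ k ∈ inp_alp.toList, inp_alp.toList.count k ≤ 1 :=
      fun k _ => List.nodup_iff_count_le_one.mp hn k
    simp only [PySem.Set.len, PySem.Str.len_eq, hlen]
    rw [if_pos (fun k hk => hall k ((PySem.Set.mem_ofList _ _).mp hk))]
    simp
  · have hlen : ¬ (PySem.Set.ofList inp_alp.toList).length = inp_alp.toList.length :=
      fun h => hn ((ofList_length_eq_iff _).mp h)
    have hall : ¬ ∀ k ∈ inp_alp.toList, inp_alp.toList.count k ≤ 1 :=
      fun h => hn (List.nodup_iff_count_le_one.mpr (fun k => by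
        by_cases hk : k ∈ inp_alp.toList
        · exact h k hk
        · simp [List.count_eq_zero_of_not_mem hk]))
    simp only [PySem.Set.len, PySem.Str.len_eq]
    rw [if_neg (fun h => hall (fun k hk => h k ((PySem.Set.mem_ofList _ _).mpr hk))),
        if_neg (by exact_mod_cast hlen)]

-- ===== VERDICT (by name: the statement is the Claim_ definition above) =====
theorem alpha_check_spec : Claim_equal_alpha_check := by
  intro s _
  exact alpha_check_eq s
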